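-- pv_equiv track=rewrite | github.com/huibuii/rubshared | Krypto/Weihnachtsprojekt/chacha20.py | cyclic_shift
-- ===== SOURCE A (Python) =====
-- def cyclic_shift(v, s):
-- 	"""
-- 	Returns rotation of v (32-bit integer) by s (integer from 0 to 32) positions to the left (cyclic)
-- 	:param v: 32-bit integer to be rotated
-- 	:param s: number of positions to rotate
-- 	:return: rotated version of v
-- 	"""
-- 	# TODO: implement cyclic shift
-- 	if not (0 <= v <= 0xFFFFFFFF):
-- 		raise TypeError("v ist nicht in der range")
--
-- 	digits = str(bin(v))[2:]
--
-- 	while (len(digits) < 32):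
-- 		digits = "0" + digits
--
-- 	s %= len(digits) # in case s is larger than v we need to modular reduce
-- 	digits =  digits[s:] + digits[:s] # The return value takes the bits from the s' position to LSB and concatenates the bits from MSB to s' position.
-- 	return int(digits, 2) #convert list to int and return
-- ===== SOURCE B (Python) =====
-- def cyclic_shift(v, s):
--     if not (0 <= v <= 0xFFFFFFFF):
--         raise TypeError("v ist nicht in der range")
--     s %= 32
--     return ((v << s) | (v >> (32 - s))) & 0xFFFFFFFF
-- ===== Notes on version B (the rewrite author's own statement) =====
-- stated objective: idiomatic
-- what changed: Replaces building a zero-padded binary string and rotating it by slicing/concatenation with a purely arithmetic 32-bit rotation using shifts, OR and a mask (s reduced mod 32 directly).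
import Mathlib
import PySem

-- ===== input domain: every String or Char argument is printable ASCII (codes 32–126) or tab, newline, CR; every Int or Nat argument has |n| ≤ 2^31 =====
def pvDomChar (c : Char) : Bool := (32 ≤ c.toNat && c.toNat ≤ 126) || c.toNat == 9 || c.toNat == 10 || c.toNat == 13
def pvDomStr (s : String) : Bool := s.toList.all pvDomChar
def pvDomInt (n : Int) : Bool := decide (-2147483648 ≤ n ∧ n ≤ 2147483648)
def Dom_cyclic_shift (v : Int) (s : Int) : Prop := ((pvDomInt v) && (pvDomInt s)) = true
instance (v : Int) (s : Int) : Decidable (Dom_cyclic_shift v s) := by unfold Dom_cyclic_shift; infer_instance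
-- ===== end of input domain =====

-- B replaces A's zero-padded binary-string building and slice-rotation by a purely arithmetic
-- 32-bit rotation with shifts, OR and a mask (idiomatic; same observable behaviour on Pre_).

-- ===== PORT A =====
-- bin(n) for n > 0, without the '0b' prefix: most-significant bit first (exact for Nat)
def pvBinDigits (n : Nat) : List Char :=
  if h : n = 0 then []
  else pvBinDigits (n / 2) ++ [if n % 2 = 1 then '1' else '0']
decreasing_by exact Nat.div_lt_self (Nat.pos_of_ne_zero h) (by omega)

-- the 'while len(digits) < 32: digits = "0" + digits' loop; fuel 32 suffices since digits is nonempty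
def pvPad : Nat → List Char → List Char
  | 0, d => d
  | f + 1, d => if d.length < 32 then pvPad f ('0' :: d) else d

-- int(digits, 2) on a string of '0'/'1' characters (exact there; A only parses such strings)
def pvParseBin (l : List Char) : Nat :=
  l.foldl (fun acc c => acc * 2 + (if c = '1' then 1 else 0)) 0

def cyclic_shift (v : Int) (s : Int) : Int :=
  if ¬ (0 ≤ v ∧ v ≤ 0xFFFFFFFF) then 0  -- Python: raise TypeError — excluded by Pre_
  else
    let digits0 : List Char := if v = 0 then ['0'] else pvBinDigits v.toNat  -- str(bin(v))[2:]
    let digits : List Char := pvPad 32 digits0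
    let k : Int := PySem.Int.mod s (digits.length : Int)  -- s %= len(digits)
    let rot : List Char :=
      PySem.List.slice digits (some k) none ++ PySem.List.slice digits none (some k)
    ((pvParseBin rot : Nat) : Int)

-- ===== PORT B =====
def cyclic_shift_alt (v : Int) (s : Int) : Int :=
  if ¬ (0 ≤ v ∧ v ≤ 0xFFFFFFFF) then 0  -- Python: raise TypeError — excluded by Pre_
  else
    let k : Nat := (PySem.Int.mod s 32).toNat         -- s %= 32 (result is in [0,31], toNat exact)
    let n : Nat := v.toNat                            -- 0 ≤ v here
    ((((n <<< k) ||| (n >>> (32 - k))) &&& 0xFFFFFFFF : Nat) : Int)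

-- ===== PRECONDITION & SPEC =====
-- Pre_ excludes exactly the inputs where the Python A raises TypeError (v outside [0, 0xFFFFFFFF]);
-- B raises identically there.
def Pre_cyclic_shift (v : Int) (s : Int) : Prop := 0 ≤ v ∧ v ≤ 0xFFFFFFFF
instance (v : Int) (s : Int) : Decidable (Pre_cyclic_shift v s) := by
  unfold Pre_cyclic_shift; infer_instance
def pvWitness_cyclic_shift : Int × Int := (5, 3)

def Spec_cyclic_shift (v : Int) (s : Int) (out : Int) : Prop := out = cyclic_shift_alt v s
instance (v : Int) (s : Int) (out : Int) : Decidable (Spec_cyclic_shift v s out) := by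
  unfold Spec_cyclic_shift; infer_instance

-- ===== CLAIM (what is proved, stated in full; the proofs are below) =====
def Claim_equal_cyclic_shift : Prop :=
  ∀ (v : Int) (s : Int), Dom_cyclic_shift v s → Pre_cyclic_shift v s →
    Spec_cyclic_shift v s (cyclic_shift v s)

-- ===== LEMMAS AND PROOFS =====

theorem pvParseBin_foldl_acc (l : List Char) (a : Nat) :
    l.foldl (fun acc c => acc * 2 + (if c = '1' then 1 else 0)) a
      = a * 2 ^ l.length + pvParseBin l := by
  induction l generalizing a with
  | nil => simp [pvParseBin]
  | cons c t ih =>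
    simp only [List.foldl_cons, List.length_cons, pvParseBin]
    rw [ih, ih]
    ring

theorem pvParseBin_append (xs ys : List Char) :
    pvParseBin (xs ++ ys) = pvParseBin xs * 2 ^ ys.length + pvParseBin ys := by
  unfold pvParseBin
  rw [List.foldl_append, pvParseBin_foldl_acc]
  rfl

theorem pvParseBin_lt (l : List Char) : pvParseBin l < 2 ^ l.length := by
  induction l with
  | nil => simp [pvParseBin]
  | cons c t ih =>
    have h : pvParseBin (c :: t)
        = (if c = '1' then 1 else 0) * 2 ^ t.length + pvParseBin t := by
      unfold pvParseBin
      simp only [List.foldl_cons]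
      rw [pvParseBin_foldl_acc]
      simp [pvParseBin]
    rw [h]
    have h2 : (2 : Nat) ^ (c :: t).length = 2 ^ t.length + 2 ^ t.length := by
      simp [pow_succ]; ring
    rw [h2]
    split_ifs <;> omega

theorem pvParseBin_binDigits (n : Nat) : pvParseBin (pvBinDigits n) = n := by
  induction n using Nat.strong_induction_on with
  | _ n ih =>
    rw [pvBinDigits]
    by_cases h : n = 0
    · rw [dif_pos h]; simp [pvParseBin, h]
    · rw [dif_neg h, pvParseBin_append,
        ih (n / 2) (Nat.div_lt_self (Nat.pos_of_ne_zero h) (by omega))]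
      rcases Nat.mod_two_eq_zero_or_one n with h2 | h2 <;>
        simp [h2, pvParseBin] <;> omega

theorem pvBinDigits_length_le (n L : Nat) (h : n < 2 ^ L) : (pvBinDigits n).length ≤ L := by
  induction n using Nat.strong_induction_on generalizing L with
  | _ n ih =>
    rw [pvBinDigits]
    by_cases h0 : n = 0
    · rw [dif_pos h0]; simp
    · rw [dif_neg h0]
      have hL : L ≠ 0 := by
        rintro rfl; simp at h; omega
      have h2 : 2 ^ L = 2 * 2 ^ (L - 1) := by
        rw [← pow_succ']; congr 1; omega
      have hdiv : n / 2 < 2 ^ (L - 1) := by omega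
      have := ih (n / 2) (Nat.div_lt_self (Nat.pos_of_ne_zero h0) (by omega)) (L - 1) hdiv
      simp only [List.length_append, List.length_singleton]
      omega

theorem pvPad_parse (f : Nat) (d : List Char) : pvParseBin (pvPad f d) = pvParseBin d := by
  induction f generalizing d with
  | zero => rfl
  | succ f ih =>
    show pvParseBin (if d.length < 32 then pvPad f ('0' :: d) else d) = pvParseBin d
    split_ifs with h
    · rw [ih]
      unfold pvParseBin
      simp
    · rfl

theorem pvPad_length (f : Nat) (d : List Char) (h1 : d.length ≤ 32) (h2 : 32 ≤ d.length + f) :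
    (pvPad f d).length = 32 := by
  induction f generalizing d with
  | zero =>
    show d.length = 32
    omega
  | succ f ih =>
    show (if d.length < 32 then pvPad f ('0' :: d) else d).length = 32
    split_ifs with h
    · exact ih ('0' :: d) (by simpa using h) (by simp; omega)
    · omega

theorem pvSplit32 (d : List Char) (k : Nat) (hlen : d.length = 32) :
    pvParseBin (d.take k) = pvParseBin d / 2 ^ (32 - k) ∧
    pvParseBin (d.drop k) = pvParseBin d % 2 ^ (32 - k) := by
  have hdl : (d.drop k).length = 32 - k := by simp [hlen]
  have hsplit : pvParseBin d
      = pvParseBin (d.take k) * 2 ^ (32 - k) + pvParseBin (d.drop k) := by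
    conv_lhs => rw [← List.take_append_drop k d]
    rw [pvParseBin_append, hdl]
  have hlt : pvParseBin (d.drop k) < 2 ^ (32 - k) := by
    have := pvParseBin_lt (d.drop k)
    rwa [hdl] at this
  constructor
  · rw [hsplit, mul_comm, Nat.mul_add_div (Nat.pow_pos (by omega)),
      Nat.div_eq_of_lt hlt, Nat.add_zero]
  · rw [hsplit, mul_comm (pvParseBin (d.take k)), Nat.mul_add_mod, Nat.mod_eq_of_lt hlt]

-- ===== VERDICT (by name: the statement is the Claim_ definition above) =====
theorem cyclic_shift_spec : Claim_equal_cyclic_shift := by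
  unfold Claim_equal_cyclic_shift
  intro v s _hdom hpre
  obtain ⟨hv0, hv1⟩ := hpre
  have hguard : ¬ ¬ (0 ≤ v ∧ v ≤ 0xFFFFFFFF) := fun h => h ⟨hv0, hv1⟩
  unfold Spec_cyclic_shift
  simp only [cyclic_shift, cyclic_shift_alt, if_neg hguard]
  set N : Nat := v.toNat with hN
  have hn32 : N < 2 ^ 32 := by omega
  set X : List Char := if v = 0 then ['0'] else pvBinDigits v.toNat with hX
  set D : List Char := pvPad 32 X with hD
  have hXlen : X.length ≤ 32 := by
    rw [hX]; split_ifs with h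
    · simp
    · exact pvBinDigits_length_le _ 32 hn32
  have hXparse : pvParseBin X = N := by
    rw [hX]; split_ifs with h
    · simp [pvParseBin, hN, h]
    · exact pvParseBin_binDigits _
  have hDlen : D.length = 32 := pvPad_length 32 X hXlen (by omega)
  have hDparse : pvParseBin D = N := by rw [hD, pvPad_parse, hXparse]
  rw [show ((D.length : Nat) : Int) = (32 : Int) by rw [hDlen]; norm_num]
  have hki0 : 0 ≤ PySem.Int.mod s 32 := PySem.Int.mod_nonneg s (by norm_num)
  have hki32 : PySem.Int.mod s 32 < 32 := PySem.Int.mod_lt s (by norm_num)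
  set k : Nat := (PySem.Int.mod s 32).toNat
  have hcast : PySem.Int.mod s 32 = (k : Int) := by omega
  rw [hcast, PySem.List.slice_from_natCast, PySem.List.slice_to_natCast]
  have hk32 : k ≤ 32 := by omega
  obtain ⟨htk, hdk⟩ := pvSplit32 D k hDlen
  have htklen : (D.take k).length = k := by simp [hDlen]; omega
  rw [pvParseBin_append, htklen, htk, hdk, hDparse]
  -- B's value, arithmetically
  have hr : N / 2 ^ (32 - k) < 2 ^ k := by
    apply Nat.div_lt_of_lt_mul
    calc N < 2 ^ 32 := hn32
    _ = 2 ^ (32 - k) * 2 ^ k := by rw [← pow_add]; congr 1; omega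
  have hPB : 2 ^ k * 2 ^ (32 - k) = 2 ^ 32 := by rw [← pow_add]; congr 1; omega
  have hB : ((N <<< k) ||| (N >>> (32 - k))) &&& 0xFFFFFFFF
      = (N % 2 ^ (32 - k)) * 2 ^ k + N / 2 ^ (32 - k) := by
    have hmask : (0xFFFFFFFF : Nat) = 2 ^ 32 - 1 := by norm_num
    rw [hmask, Nat.and_two_pow_sub_one_eq_mod, Nat.shiftLeft_eq,
      Nat.shiftRight_eq_div_pow, mul_comm N (2 ^ k), ← Nat.two_pow_add_eq_or_of_lt hr]
    have hdm : 2 ^ (32 - k) * (N / 2 ^ (32 - k)) + N % 2 ^ (32 - k) = N :=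
      Nat.div_add_mod N (2 ^ (32 - k))
    have hexp : 2 ^ k * N + N / 2 ^ (32 - k)
        = (2 ^ k * (N % 2 ^ (32 - k)) + N / 2 ^ (32 - k)) + (N / 2 ^ (32 - k)) * 2 ^ 32 := by
      rw [← hPB]
      calc 2 ^ k * N + N / 2 ^ (32 - k)
          = 2 ^ k * (2 ^ (32 - k) * (N / 2 ^ (32 - k)) + N % 2 ^ (32 - k))
              + N / 2 ^ (32 - k) := by rw [hdm]
        _ = (2 ^ k * (N % 2 ^ (32 - k)) + N / 2 ^ (32 - k))
              + (N / 2 ^ (32 - k)) * (2 ^ k * 2 ^ (32 - k)) := by ring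
    have hm : N % 2 ^ (32 - k) < 2 ^ (32 - k) := Nat.mod_lt _ (Nat.pow_pos (by omega))
    have hlt2 : 2 ^ k * (N % 2 ^ (32 - k)) + N / 2 ^ (32 - k) < 2 ^ 32 := by
      calc 2 ^ k * (N % 2 ^ (32 - k)) + N / 2 ^ (32 - k)
          < 2 ^ k * (N % 2 ^ (32 - k)) + 2 ^ k := by omega
        _ = 2 ^ k * (N % 2 ^ (32 - k) + 1) := by ring
        _ ≤ 2 ^ k * 2 ^ (32 - k) := Nat.mul_le_mul_left _ (by omega)
        _ = 2 ^ 32 := hPB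
    rw [hexp, Nat.add_mul_mod_self_right, Nat.mod_eq_of_lt hlt2]
    ring
  rw [hB]
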